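-- pv_equiv track=rewrite | github.com/Ayda2234/Recherche_naive | naive_search.py | DPR
-- ===== SOURCE A (Python) =====
-- def DPR(element_cible, data):
--     # if the dataset is empty
--     if not data:
--         return 0
--
--     if len(data) == 1:
--         return 1 if element_cible in data[0] else 0
--
--     mid = len(data) // 2
--     fg = data[:mid]
--     fd = data[mid:]
--
--     # calculate occurrences number in the left and right side recursively
--     occurrences = DPR(element_cible, fg) + DPR(element_cible, fd)
--
--     return occurrences
-- ===== SOURCE B (Python) =====
-- def DPR(element_cible, data):
--     return sum(1 for row in data if element_cible in row)
-- ===== Notes on version B (the rewrite author's own statement) =====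
-- stated objective: faster
-- what changed: Replaced the divide-and-conquer recursion with repeated list slicing by a single linear generator pass summing membership tests.
import Mathlib
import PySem

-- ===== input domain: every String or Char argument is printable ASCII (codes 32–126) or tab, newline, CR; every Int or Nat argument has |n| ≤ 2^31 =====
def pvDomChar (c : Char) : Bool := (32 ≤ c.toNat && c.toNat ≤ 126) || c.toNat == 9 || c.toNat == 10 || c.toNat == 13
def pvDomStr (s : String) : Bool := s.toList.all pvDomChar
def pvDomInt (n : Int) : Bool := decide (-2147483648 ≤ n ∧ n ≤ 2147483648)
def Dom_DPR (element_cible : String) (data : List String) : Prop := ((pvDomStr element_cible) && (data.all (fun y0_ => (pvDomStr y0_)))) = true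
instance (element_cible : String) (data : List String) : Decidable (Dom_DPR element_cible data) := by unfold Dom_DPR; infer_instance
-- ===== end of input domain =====

-- B replaces A's divide-and-conquer recursion (with list slicing) by one linear pass summing membership tests.

-- ===== PORT A =====
def DPR (element_cible : String) (data : List String) : Int :=
  if h0 : data = [] then 0
  else if h1 : data.length = 1 then
    (match data with
     | x :: _ => if PySem.Str.isIn element_cible x then 1 else 0
     | [] => 0)   -- unreachable: data ≠ []
  else
    let mid : Nat := data.length / 2
    let fg := PySem.List.slice data none (some (mid : Int))
    let fd := PySem.List.slice data (some (mid : Int)) none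
    DPR element_cible fg + DPR element_cible fd
termination_by data.length
decreasing_by
  all_goals simp only [PySem.List.slice_to_natCast, PySem.List.slice_from_natCast,
    List.length_take, List.length_drop]
  all_goals
    have hne : data.length ≠ 0 := fun hh => h0 (List.eq_nil_of_length_eq_zero hh)
    omega


-- ===== PORT B =====
def DPR_alt (element_cible : String) (data : List String) : Int :=
  data.foldl (fun acc row => if PySem.Str.isIn element_cible row then acc + 1 else acc) 0

-- ===== PRECONDITION & SPEC =====
def Spec_DPR (element_cible : String) (data : List String) (out : Int) : Prop := out = DPR_alt element_cible data
instance (element_cible : String) (data : List String) (out : Int) : Decidable (Spec_DPR element_cible data out) := by unfold Spec_DPR; infer_instance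

-- ===== CLAIM (what is proved, stated in full; the proofs are below) =====
def Claim_equal_DPR : Prop := ∀ (element_cible : String) (data : List String), Dom_DPR element_cible data → Spec_DPR element_cible data (DPR element_cible data)

-- ===== LEMMAS AND PROOFS =====

-- B's fold from any accumulator
theorem DPR_alt_foldl (ec : String) (data : List String) (a : Int) :
    data.foldl (fun acc row => if PySem.Str.isIn ec row then acc + 1 else acc) a
      = a + ((data.filter (fun r => PySem.Str.isIn ec r)).length : Int) := by
  induction data generalizing a with
  | nil => simp
  | cons x xs ih =>
    rw [List.foldl_cons, List.filter_cons]
    by_cases h : PySem.Str.isIn ec x = true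
    · rw [if_pos h, if_pos h, ih, List.length_cons]
      push_cast; ring
    · rw [if_neg h, if_neg h, ih]

-- A computes the count of matching rows
theorem DPR_eq_count (ec : String) : ∀ (n : Nat) (data : List String), data.length ≤ n →
    DPR ec data = ((data.filter (fun r => PySem.Str.isIn ec r)).length : Int) := by
  intro n
  induction n with
  | zero =>
    intro data h
    have : data = [] := List.eq_nil_of_length_eq_zero (Nat.le_zero.mp h)
    subst this; simp [DPR]
  | succ n ih =>
    intro data h
    rw [DPR.eq_def]
    by_cases h0 : data = []
    · subst h0; simp
    · rw [dif_neg h0]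
      by_cases h1 : data.length = 1
      · match data, h1 with
        | [x], _ =>
          rw [dif_pos (show [x].length = 1 from by simp)]
          by_cases hx : PySem.Chars.isIn ec.toList x.toList = true <;>
            simp [hx]
      · rw [dif_neg h1]
        have hlen : 2 ≤ data.length := by
          cases hd : data.length with
          | zero => exact absurd (List.eq_nil_of_length_eq_zero hd) h0
          | succ m => omega
        simp only [PySem.List.slice_to_natCast, PySem.List.slice_from_natCast]
        rw [ih _ (by simp; omega), ih _ (by simp; omega)]
        conv_rhs => rw [← List.take_append_drop (data.length / 2) data]
        rw [List.filter_append, List.length_append]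
        push_cast; ring

-- ===== VERDICT (by name: the statement is the Claim_ definition above) =====
theorem DPR_spec : Claim_equal_DPR := by
  intro ec data _
  unfold Spec_DPR DPR_alt
  rw [DPR_eq_count ec data.length data le_rfl, DPR_alt_foldl]
  simp
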